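-- pv_equiv track=rewrite | github.com/overheersbeest/Advent-of-Code | 2023/Day1.py | GetCalibrationValue_PartOne
-- ===== SOURCE A (Python) =====
-- def GetCalibrationValue_PartOne(line):
--     first = None
--     last = None
--     for char in line:
--         if str.isnumeric(char):
--             last = int(char)
--             if first == None:
--                 first = last
--     return first*10 + last
-- ===== SOURCE B (Python) =====
-- def GetCalibrationValue_PartOne(line):
--     first = None
--     for char in line:
--         if str.isnumeric(char):
--             first = int(char)
--             break
--     last = None
--     for char in reversed(line):
--         if str.isnumeric(char):
--             last = int(char)
--             break
--     return first*10 + last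
-- ===== Notes on version B (the rewrite author's own statement) =====
-- stated objective: simpler
-- what changed: Replaces the single overwrite-tracking loop (which rewrites last on every digit) with two short-circuiting directional scans: forward for the first digit, backward for the last, each breaking at the first hit.
import Mathlib
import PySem

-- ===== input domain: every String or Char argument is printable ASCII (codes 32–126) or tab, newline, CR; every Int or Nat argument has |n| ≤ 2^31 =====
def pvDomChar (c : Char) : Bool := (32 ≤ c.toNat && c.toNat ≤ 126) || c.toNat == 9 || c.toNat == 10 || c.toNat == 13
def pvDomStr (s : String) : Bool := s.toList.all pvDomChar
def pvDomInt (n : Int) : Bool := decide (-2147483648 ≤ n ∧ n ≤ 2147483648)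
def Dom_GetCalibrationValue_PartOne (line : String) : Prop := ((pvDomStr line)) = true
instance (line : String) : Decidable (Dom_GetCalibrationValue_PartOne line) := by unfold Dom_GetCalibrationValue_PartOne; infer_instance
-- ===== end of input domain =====

-- B finds the first and last digits by two short-circuiting directional scans instead of A's
-- single loop that overwrites `last` on every digit; equivalence of the RETURN value on lines
-- containing at least one decimal digit (on digit-free lines both Pythons raise TypeError).

-- ===== PORT A =====
-- digit value of an ASCII digit character (Python's int(char) on the Dom/isnumeric = ASCII-digit case)
def pvDigitVal (c : Char) : Int := (c.toNat : Int) - 48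

-- one iteration of A's loop body over the state (first, last)
def pvStepA (p : Option Int × Option Int) (c : Char) : Option Int × Option Int :=
  if c.isDigit then
    let last := some (pvDigitVal c)
    (if p.1 = none then last else p.1, last)
  else p

def GetCalibrationValue_PartOne (line : String) : Int :=
  let st := line.toList.foldl pvStepA (none, none)
  -- under Pre_ both components are `some`; on a digit-free line Python raises TypeError (excluded by Pre_)
  st.1.getD 0 * 10 + st.2.getD 0

-- ===== PORT B =====
def GetCalibrationValue_PartOne_alt (line : String) : Int :=
  let first := line.toList.find? (fun c => c.isDigit)
  let last := line.toList.reverse.find? (fun c => c.isDigit)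
  match first, last with
  | some a, some b => pvDigitVal a * 10 + pvDigitVal b
  | _, _ => 0  -- unreachable under Pre_; Python raises TypeError here

-- ===== PRECONDITION & SPEC =====
-- Pre_ excludes lines without any decimal digit: there both A and B raise TypeError (None*10 + None).
def Pre_GetCalibrationValue_PartOne (line : String) : Prop :=
  line.toList.any (fun c => c.isDigit) = true
instance (line : String) : Decidable (Pre_GetCalibrationValue_PartOne line) := by
  unfold Pre_GetCalibrationValue_PartOne; infer_instance

def pvWitness_GetCalibrationValue_PartOne : String := "a1b2c"

def Spec_GetCalibrationValue_PartOne (line : String) (out : Int) : Prop := out = GetCalibrationValue_PartOne_alt line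
instance (line : String) (out : Int) : Decidable (Spec_GetCalibrationValue_PartOne line out) := by unfold Spec_GetCalibrationValue_PartOne; infer_instance

-- ===== CLAIM (what is proved, stated in full; the proofs are below) =====
def Claim_equal_GetCalibrationValue_PartOne : Prop := ∀ (line : String), Dom_GetCalibrationValue_PartOne line → Pre_GetCalibrationValue_PartOne line → Spec_GetCalibrationValue_PartOne line (GetCalibrationValue_PartOne line)

-- ===== LEMMAS AND PROOFS =====

-- once `first` is set it never changes
theorem foldA_fst_some (xs : List Char) (f : Int) (l : Option Int) :
    (xs.foldl pvStepA (some f, l)).1 = some f := by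
  induction xs generalizing l with
  | nil => rfl
  | cons x xs ih =>
    simp only [List.foldl_cons, pvStepA]
    by_cases h : x.isDigit <;> simp [h, ih]

-- the first component of A's fold from the empty state is the first digit
theorem foldA_fst (xs : List Char) (l : Option Int) :
    (xs.foldl pvStepA (none, l)).1 = (xs.find? (fun c => c.isDigit)).map pvDigitVal := by
  induction xs generalizing l with
  | nil => rfl
  | cons x xs ih =>
    simp only [List.foldl_cons, pvStepA, List.find?_cons]
    by_cases h : x.isDigit
    · simp [h, foldA_fst_some]
    · simp [h, ih]

-- the second component of A's fold is the last digit (= first digit of the reverse), else the incoming value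
theorem foldA_snd (xs : List Char) (p : Option Int × Option Int) :
    (xs.foldl pvStepA p).2 =
      match xs.reverse.find? (fun c => c.isDigit) with
      | some c => some (pvDigitVal c)
      | none => p.2 := by
  induction xs generalizing p with
  | nil => rfl
  | cons x xs ih =>
    simp only [List.foldl_cons, List.reverse_cons, List.find?_append]
    rw [ih]
    cases hfind : xs.reverse.find? (fun c => c.isDigit) with
    | some c => simp
    | none =>
      simp only [Option.none_or]
      by_cases h : x.isDigit <;> simp [pvStepA, h, List.find?]

-- ===== VERDICT (by name: the statement is the Claim_ definition above) =====
theorem GetCalibrationValue_PartOne_spec : Claim_equal_GetCalibrationValue_PartOne := by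
  intro line _ hpre
  unfold Spec_GetCalibrationValue_PartOne GetCalibrationValue_PartOne GetCalibrationValue_PartOne_alt
  have hfst := foldA_fst line.toList none
  have hsnd := foldA_snd line.toList (none, none)
  unfold Pre_GetCalibrationValue_PartOne at hpre
  rw [List.any_eq_true] at hpre
  obtain ⟨c, hc, hdig⟩ := hpre
  have hfind : ∃ a, line.toList.find? (fun c => c.isDigit) = some a := by
    rcases hf : line.toList.find? (fun c => c.isDigit) with _ | a
    · exact absurd hdig (by simpa using List.find?_eq_none.mp hf c hc)
    · exact ⟨a, hf⟩
  have hfindR : ∃ b, line.toList.reverse.find? (fun c => c.isDigit) = some b := by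
    rcases hf : line.toList.reverse.find? (fun c => c.isDigit) with _ | b
    · exact absurd hdig (by simpa using List.find?_eq_none.mp hf c (by simpa using hc))
    · exact ⟨b, hf⟩
  obtain ⟨a, ha⟩ := hfind
  obtain ⟨b, hb⟩ := hfindR
  simp only [ha, hb] at hfst hsnd ⊢
  rw [hfst, hsnd]
  rfl
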